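-- pv_equiv track=rewrite | github.com/woodg1207/APS | python/programmers/2020_kakao_blind/LockKey.py | solution
-- ===== SOURCE A (Python) =====
-- def rotate(arr, c, cnt):
--     if c == cnt:
--         return arr
--     n = len(arr)
--     result = []
--     for i in range(n):
--         temp = []
--         for j in range(n):
--             temp.append(arr[n-j-1][i])
--         result.append(temp)
--     return rotate(result, c, cnt+1)
--
-- def moveCheck(mr, mc, k, l):
--     N, M = len(l), len(k)
--     for i in range(N):
--         for j in range(N):
--             x = l[i][j]
--             if 0 <= i-mr < M and 0 <= j-mc < M:
--                 x += k[i-mr][j-mc]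
--             if x!=1: return False
--
--     return True
--
-- def solution(key, lock):
--     N = len(lock)
--     for r in range(4):
--         k = rotate(key, r, 0)
--         ## 위치이동 시키면서 맞추기.
--         for mr in range(-N+1, N):
--             for mc in range(-N+1,N):
--                 if moveCheck(mr, mc, k, lock): return True
--     return False
-- ===== SOURCE B (Python) =====
-- def solution(key, lock):
--     n = len(lock)
--     m = len(key)
--     L = [row[:n] for row in lock]
--     K = [row[:m] for row in key]
--     defects = [(i, j, v) for i, row in enumerate(L) for j, v in enumerate(row) if v != 1]
--     for _ in range(4):
--         ones = [(a, b, w) for a, row in enumerate(K) for b, w in enumerate(row) if w != 0]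
--         for mr in range(1 - n, n):
--             for mc in range(1 - n, n):
--                 if (all(0 <= i - mr < m and 0 <= j - mc < m and K[i - mr][j - mc] == 1 - v
--                         for (i, j, v) in defects)
--                     and all(not (0 <= a + mr < n and 0 <= b + mc < n and L[a + mr][b + mc] == 1)
--                             for (a, b, w) in ones)):
--                     return True
--         K = [list(row) for row in zip(*K[::-1])]
--     return False
-- ===== Notes on version B (the rewrite author's own statement) =====
-- stated objective: alternative
-- what changed: A rescans all N*N lock cells for every rotation/offset; B precomputes once the sparse list of lock cells that are not 1 and, per rotation, the key's nonzero cells, and per offset only checks that each defect is covered by a matching key cell and that no nonzero key cell lands on a lock 1-cell.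
-- outside the precondition, e.g. on solution([[1, 1, 1, 0], [1, 1], [0, 1, 1]], [[1, 0, 0], [1, 0]]): A returns True, B raises IndexError
import Mathlib
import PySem

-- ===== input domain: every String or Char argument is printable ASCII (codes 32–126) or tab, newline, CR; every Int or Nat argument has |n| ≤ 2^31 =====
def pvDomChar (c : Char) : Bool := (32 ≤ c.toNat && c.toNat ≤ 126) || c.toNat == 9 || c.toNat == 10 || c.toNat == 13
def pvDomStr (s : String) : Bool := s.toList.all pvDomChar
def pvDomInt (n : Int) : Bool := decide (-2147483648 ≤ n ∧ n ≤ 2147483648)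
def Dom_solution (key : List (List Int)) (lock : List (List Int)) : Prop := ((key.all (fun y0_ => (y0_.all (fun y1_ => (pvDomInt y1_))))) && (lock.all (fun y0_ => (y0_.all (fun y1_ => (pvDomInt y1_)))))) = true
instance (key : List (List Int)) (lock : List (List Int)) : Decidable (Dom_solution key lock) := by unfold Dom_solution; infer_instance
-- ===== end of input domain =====

-- B replaces A's dense per-offset N×N rescan by a sparse check over the lock's non-1 cells and
-- the key's non-0 cells (objective: alternative algorithm; worst-case cost is comparable).

-- ===== PORT A =====
-- one 90° rotation step: the body of the loops in Python's rotate (result[i][j] = arr[n-j-1][i]);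
-- getD defaults are never hit under Pre_ (square-enough grids)
def rotStepA (arr : List (List Int)) : List (List Int) :=
  let n := arr.length
  (List.range n).map (fun i => (List.range n).map (fun j => (arr.getD (n - j - 1) []).getD i 0))

-- Python: 'if c == cnt: return arr' then recurse with cnt+1; for c < cnt Python never terminates,
-- so the '≤' guard only makes the function total (solution only calls it with cnt = 0 ≤ c)
def rotate (arr : List (List Int)) (c cnt : Int) : List (List Int) :=
  if c ≤ cnt then arr
  else rotate (rotStepA arr) c (cnt + 1)
termination_by (c - cnt).toNat
decreasing_by omega

def moveCheck (mr mc : Int) (k l : List (List Int)) : Bool :=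
  let N := l.length
  let M := k.length
  (List.range N).all (fun i => (List.range N).all (fun j =>
    let x := (l.getD i []).getD j 0
    let x := if 0 ≤ (i : Int) - mr ∧ (i : Int) - mr < (M : Int) ∧ 0 ≤ (j : Int) - mc ∧ (j : Int) - mc < (M : Int)
             then x + ((k.getD ((i : Int) - mr).toNat []).getD ((j : Int) - mc).toNat 0)
             else x
    x == 1))

def solution (key : List (List Int)) (lock : List (List Int)) : Bool :=
  let N : Int := lock.length
  (List.range 4).any (fun r =>
    let k := rotate key r 0
    (PySem.List.pyRange (-N + 1) N 1).any (fun mr =>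
      (PySem.List.pyRange (-N + 1) N 1).any (fun mc => moveCheck mr mc k lock)))

-- ===== PORT B =====
-- zip(*rows): take heads while every row is nonempty (exact Python zip semantics)
def zipStar (rows : List (List Int)) : List (List Int) :=
  if rows = [] ∨ rows.any (fun r => r.isEmpty) then []
  else (rows.map (fun r => r.headD 0)) :: zipStar (rows.map List.tail)
termination_by (rows.headD []).length
decreasing_by
  rename_i h
  rw [not_or] at h
  obtain ⟨h1, h2⟩ := h
  cases rows with
  | nil => exact absurd rfl h1
  | cons r rs =>
    have hr : r ≠ [] := by
      intro hc
      subst hc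
      simp at h2
    simp only [List.attach_cons, List.map_cons, List.headD_cons, List.length_tail]
    have := List.length_pos_iff.mpr hr
    omega

-- [list(row) for row in zip(*K[::-1])]
def rotStepB (K : List (List Int)) : List (List Int) := zipStar K.reverse

-- [(i, j, v) for i, row in enumerate(L) for j, v in enumerate(row) if v != 1]
def defectsOf (L : List (List Int)) : List (Int × Int × Int) :=
  (PySem.List.enumerate L 0).flatMap (fun p =>
    (PySem.List.enumerate p.2 0).filterMap (fun q =>
      if q.2 ≠ 1 then some (p.1, q.1, q.2) else none))

-- [(a, b, w) for a, row in enumerate(K) for b, w in enumerate(row) if w != 0]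
def onesOf (K : List (List Int)) : List (Int × Int × Int) :=
  (PySem.List.enumerate K 0).flatMap (fun p =>
    (PySem.List.enumerate p.2 0).filterMap (fun q =>
      if q.2 ≠ 0 then some (p.1, q.1, q.2) else none))

-- the condition tested for one offset (mr, mc)
def fitsB (m n : Int) (K L : List (List Int)) (defects ones : List (Int × Int × Int)) (mr mc : Int) : Bool :=
  (defects.all (fun (i, j, v) =>
    decide (0 ≤ i - mr ∧ i - mr < m ∧ 0 ≤ j - mc ∧ j - mc < m) &&
    ((K.getD (i - mr).toNat []).getD (j - mc).toNat 0 == 1 - v))) &&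
  (ones.all (fun (a, b, _w) =>
    !(decide (0 ≤ a + mr ∧ a + mr < n ∧ 0 ≤ b + mc ∧ b + mc < n) &&
      ((L.getD (a + mr).toNat []).getD (b + mc).toNat 0 == 1))))

-- 'for _ in range(4): … ; K = rotate(K)' with the early return as ||
def solLoop (n m : Int) (L : List (List Int)) (defects : List (Int × Int × Int)) :
    List (List Int) → Nat → Bool
  | _, 0 => false
  | K, c + 1 =>
    (let ones := onesOf K
     (PySem.List.pyRange (1 - n) n 1).any (fun mr =>
       (PySem.List.pyRange (1 - n) n 1).any (fun mc =>
         fitsB m n K L defects ones mr mc)))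
    || solLoop n m L defects (rotStepB K) c

def solution_alt (key : List (List Int)) (lock : List (List Int)) : Bool :=
  let n : Int := lock.length
  let m : Int := key.length
  let L := lock.map (fun row => PySem.List.slice row none (some n))
  let K := key.map (fun row => PySem.List.slice row none (some m))
  solLoop n m L (defectsOf L) K 4

-- ===== PRECONDITION & SPEC =====
-- Pre_ excludes grids containing a row shorter than the grid's side length: on those A raises
-- IndexError except when an early 'return True/False' happens before the short row is read.
def Pre_solution (key : List (List Int)) (lock : List (List Int)) : Prop :=
  (∀ row ∈ key, key.length ≤ row.length) ∧ (∀ row ∈ lock, lock.length ≤ row.length)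
instance (key : List (List Int)) (lock : List (List Int)) : Decidable (Pre_solution key lock) := by
  unfold Pre_solution; infer_instance

def pvWitness_solution : List (List Int) × List (List Int) := ([[1]], [[0]])

def Spec_solution (key : List (List Int)) (lock : List (List Int)) (out : Bool) : Prop := out = solution_alt key lock
instance (key : List (List Int)) (lock : List (List Int)) (out : Bool) : Decidable (Spec_solution key lock out) := by unfold Spec_solution; infer_instance

-- ===== CLAIM (what is proved, stated in full; the proofs are below) =====
def Claim_equal_solution : Prop := ∀ (key : List (List Int)) (lock : List (List Int)), Dom_solution key lock → Pre_solution key lock → Spec_solution key lock (solution key lock)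

-- ===== LEMMAS AND PROOFS =====

-- value of cell (i, j) of a grid (defaults never hit at in-range indices)
def cellv (g : List (List Int)) (i j : Nat) : Int := (g.getD i []).getD j 0

-- grid g is an exact q × q square
def Sq (g : List (List Int)) (q : Nat) : Prop := g.length = q ∧ ∀ row ∈ g, row.length = q

-- the mathematical per-offset condition both per-offset checks are proved equivalent to
def OKP (n m : Nat) (K L : List (List Int)) (mr mc : Int) : Prop :=
  ∀ i < n, ∀ j < n,
    cellv L i j +
      (if 0 ≤ (i : Int) - mr ∧ (i : Int) - mr < (m : Int) ∧ 0 ≤ (j : Int) - mc ∧ (j : Int) - mc < (m : Int)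
       then cellv K ((i : Int) - mr).toNat ((j : Int) - mc).toNat else 0) = 1


theorem moveCheck_iff (mr mc : Int) (k l : List (List Int)) :
    moveCheck mr mc k l = true ↔ OKP l.length k.length k l mr mc := by
  unfold moveCheck OKP cellv
  simp only [List.all_eq_true, List.mem_range, beq_iff_eq]
  refine forall_congr' fun i => forall_congr' fun hi => forall_congr' fun j => forall_congr' fun hj => ?_
  split_ifs with h
  · exact Iff.rfl
  · omega

theorem OKP_congr (n m : Nat) (K K' L L' : List (List Int)) (mr mc : Int)
    (hl : ∀ i < n, ∀ j < n, cellv L i j = cellv L' i j)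
    (hk : ∀ a < m, ∀ b < m, cellv K a b = cellv K' a b) :
    OKP n m K L mr mc ↔ OKP n m K' L' mr mc := by
  unfold OKP
  refine forall_congr' fun i => forall_congr' fun hi => forall_congr' fun j => forall_congr' fun hj => ?_
  rw [hl i hi j hj]
  split_ifs with h
  · rw [hk _ (by omega) _ (by omega)]
  · exact Iff.rfl

theorem rotStepA_sq (arr : List (List Int)) : Sq (rotStepA arr) arr.length := by
  unfold Sq rotStepA
  simp

theorem rotStepA_congr (g g' : List (List Int)) (h : g.length = g'.length)
    (hc : ∀ i < g.length, ∀ j < g.length, cellv g i j = cellv g' i j) :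
    rotStepA g = rotStepA g' := by
  unfold rotStepA
  rw [← h]
  refine List.map_congr_left fun i hi => List.map_congr_left fun j hj => ?_
  simp only [List.mem_range] at hi hj
  exact hc _ (by omega) _ hi

theorem zipStar_sq (q : Nat) : ∀ (rows : List (List Int)), rows ≠ [] →
    (∀ row ∈ rows, row.length = q) →
    zipStar rows = (List.range q).map (fun i => rows.map (fun r => r.getD i 0)) := by
  induction q with
  | zero =>
    intro rows h1 h2
    rw [zipStar, if_pos]
    · simp
    · right
      match rows, h1 with
      | r :: rs, _ =>
        simp only [List.any_cons, Bool.or_eq_true]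
        left
        have := h2 r List.mem_cons_self
        simpa [List.isEmpty_iff, List.length_eq_zero_iff] using this
  | succ p ih =>
    intro rows h1 h2
    rw [zipStar, if_neg]
    · rw [ih (rows.map List.tail)
        (by simpa using h1)
        (by intro row hr
            simp only [List.mem_map] at hr
            obtain ⟨r, hr, rfl⟩ := hr
            have := h2 r hr
            simp [List.length_tail, this])]
      rw [List.range_succ_eq_map]
      simp only [List.map_cons, List.map_map]
      congr 1
      · refine List.map_congr_left fun r hr => ?_
        have hlen := h2 r hr
        cases r with
        | nil => simp at hlen
        | cons a as => simp
      · refine List.map_congr_left fun i _ => ?_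
        simp only [Function.comp_def]
        refine List.map_congr_left fun r hr => ?_
        have hlen := h2 r hr
        cases r with
        | nil => simp at hlen
        | cons a as => simp
    · rw [not_or]
      constructor
      · exact h1
      · simp only [List.any_eq_true, not_exists]
        intro r
        rw [not_and]
        intro hr hc
        have := h2 r hr
        rw [List.isEmpty_iff] at hc
        subst hc
        simp at this

theorem rotStepB_eq_rotStepA (g : List (List Int)) (q : Nat) (hg : Sq g q) :
    rotStepB g = rotStepA g := by
  obtain ⟨hlen, hrows⟩ := hg
  unfold rotStepB rotStepA
  cases g with
  | nil => rw [zipStar]; simp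
  | cons r rs =>
    rw [zipStar_sq q _ (by simp) (by intro row hr; exact hrows row (by simpa using List.mem_reverse.mp hr))]
    simp only [← hlen]
    refine List.map_congr_left fun i hi => ?_
    simp only [List.mem_range] at hi
    apply List.ext_getElem
    · simp
    · intro j hj1 hj2
      simp only [List.getElem_map, List.getElem_range, List.getElem_reverse]
      have hlr : (r :: rs).length - 1 - j = (r :: rs).length - j - 1 := by omega
      have hlt : (r :: rs).length - 1 - j < (r :: rs).length := by
        simp at hj1
        omega
      rw [← hlr]
      conv_rhs => rw [List.getD_eq_getElem _ _ hlt]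

theorem rotate_eq_iter (q : Nat) : ∀ (arr : List (List Int)) (c cnt : Int),
    cnt ≤ c → c - cnt = q → rotate arr c cnt = rotStepA^[q] arr := by
  induction q with
  | zero =>
    intro arr c cnt h1 h2
    rw [rotate, if_pos (by omega)]
    rfl
  | succ p ih =>
    intro arr c cnt h1 h2
    rw [rotate, if_neg (by omega)]
    rw [ih (rotStepA arr) c (cnt + 1) (by omega) (by omega)]
    rw [← Function.iterate_succ_apply]

theorem solLoop_eq (n m : Int) (L : List (List Int)) (defects : List (Int × Int × Int)) :
    ∀ (c : Nat) (K : List (List Int)), solLoop n m L defects K c =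
      (List.range c).any (fun r =>
        (PySem.List.pyRange (1 - n) n 1).any (fun mr =>
          (PySem.List.pyRange (1 - n) n 1).any (fun mc =>
            fitsB m n (rotStepB^[r] K) L defects (onesOf (rotStepB^[r] K)) mr mc))) := by
  intro c
  induction c with
  | zero => intro K; rfl
  | succ p ih =>
    intro K
    rw [solLoop, ih (rotStepB K), List.range_succ_eq_map]
    simp only [List.any_cons, List.any_map, Function.iterate_zero_apply, Function.comp_def,
      Function.iterate_succ_apply]

theorem cellv_eq (L : List (List Int)) (i j : Nat) (hi : i < L.length) :
    cellv L i j = (L[i]).getD j 0 := by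
  unfold cellv
  rw [List.getD_eq_getElem _ _ hi]

theorem mem_defectsOf (L : List (List Int)) (t : Int × Int × Int) :
    t ∈ defectsOf L ↔ ∃ i < L.length, ∃ j < (L.getD i []).length,
      cellv L i j ≠ 1 ∧ t = ((i : Int), (j : Int), cellv L i j) := by
  unfold defectsOf
  simp only [List.mem_flatMap, List.mem_filterMap, PySem.List.mem_enumerate_iff]
  constructor
  · rintro ⟨p, ⟨i, hi, rfl⟩, q, ⟨j, hj, rfl⟩, hf⟩
    split_ifs at hf with hv
    refine ⟨i, hi, j, ?_, ?_, ?_⟩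
    · rwa [List.getD_eq_getElem _ _ hi]
    · rw [cellv_eq _ _ _ hi, List.getD_eq_getElem _ _ hj]
      simpa using hv
    · rw [cellv_eq _ _ _ hi, List.getD_eq_getElem _ _ hj]
      simpa using hf.symm
  · rintro ⟨i, hi, j, hj, hv, rfl⟩
    rw [List.getD_eq_getElem _ _ hi] at hj
    refine ⟨(0 + (i : Int), L[i]), ⟨i, hi, rfl⟩, (0 + (j : Int), L[i][j]), ⟨j, hj, rfl⟩, ?_⟩
    rw [cellv_eq _ _ _ hi, List.getD_eq_getElem _ _ hj] at hv ⊢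
    simp [hv]

theorem mem_onesOf (K : List (List Int)) (t : Int × Int × Int) :
    t ∈ onesOf K ↔ ∃ a < K.length, ∃ b < (K.getD a []).length,
      cellv K a b ≠ 0 ∧ t = ((a : Int), (b : Int), cellv K a b) := by
  unfold onesOf
  simp only [List.mem_flatMap, List.mem_filterMap, PySem.List.mem_enumerate_iff]
  constructor
  · rintro ⟨p, ⟨a, ha, rfl⟩, q, ⟨b, hb, rfl⟩, hf⟩
    split_ifs at hf with hv
    refine ⟨a, ha, b, ?_, ?_, ?_⟩
    · rwa [List.getD_eq_getElem _ _ ha]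
    · rw [cellv_eq _ _ _ ha, List.getD_eq_getElem _ _ hb]
      simpa using hv
    · rw [cellv_eq _ _ _ ha, List.getD_eq_getElem _ _ hb]
      simpa using hf.symm
  · rintro ⟨a, ha, b, hb, hv, rfl⟩
    rw [List.getD_eq_getElem _ _ ha] at hb
    refine ⟨(0 + (a : Int), K[a]), ⟨a, ha, rfl⟩, (0 + (b : Int), K[a][b]), ⟨b, hb, rfl⟩, ?_⟩
    rw [cellv_eq _ _ _ ha, List.getD_eq_getElem _ _ hb] at hv ⊢
    simp [hv]

theorem fits_iff (n m : Nat) (K L : List (List Int))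
    (hL : L.length = n) (hLr : ∀ row ∈ L, row.length = n)
    (hK : K.length = m) (hKr : ∀ row ∈ K, row.length = m) (mr mc : Int) :
    fitsB (m : Int) (n : Int) K L (defectsOf L) (onesOf K) mr mc = true ↔ OKP n m K L mr mc := by
  have hKrow : ∀ a, a < m → (K.getD a []).length = m := by
    intro a ha
    rw [List.getD_eq_getElem _ _ (by omega)]
    exact hKr _ (List.getElem_mem _)
  have hLrow : ∀ i, i < n → (L.getD i []).length = n := by
    intro i hi
    rw [List.getD_eq_getElem _ _ (by omega)]
    exact hLr _ (List.getElem_mem _)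
  unfold fitsB
  rw [Bool.and_eq_true, List.all_eq_true, List.all_eq_true]
  constructor
  · rintro ⟨h1, h2⟩ i hi j hj
    by_cases hv : cellv L i j = 1
    · rw [hv]
      split_ifs with hC
      · by_cases hw : cellv K ((i : Int) - mr).toNat ((j : Int) - mc).toNat = 0
        · omega
        · exfalso
          set a : Nat := ((i : Int) - mr).toNat with ha
          set b : Nat := ((j : Int) - mc).toNat with hb
          have haK : a < K.length := by omega
          have hbK : b < (K.getD a []).length := by
            rw [hKrow a (by omega)]
            omega
          have ht := h2 _ ((mem_onesOf K ((a : Int), (b : Int), cellv K a b)).mpr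
            ⟨a, haK, b, hbK, hw, rfl⟩)
          simp only [Bool.not_eq_eq_eq_not, Bool.not_true, Bool.and_eq_false_iff,
            decide_eq_false_iff_not, beq_eq_false_iff_ne, ne_eq] at ht
          have hia : (a : Int) + mr = (i : Int) := by omega
          have hjb : (b : Int) + mc = (j : Int) := by omega
          rcases ht with ht | ht
          · exact ht (by rw [hia, hjb]; exact ⟨by omega, by omega, by omega, by omega⟩)
          · apply ht
            rw [hia, hjb]
            have hti : ((i : Int)).toNat = i := by omega
            have htj : ((j : Int)).toNat = j := by omega
            rw [hti, htj]
            exact hv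
      · rw [add_zero]
    · have hiL : i < L.length := by omega
      have hjL : j < (L.getD i []).length := by
        rw [hLrow i hi]
        omega
      have ht := h1 _ ((mem_defectsOf L ((i : Int), (j : Int), cellv L i j)).mpr
        ⟨i, hiL, j, hjL, hv, rfl⟩)
      simp only [Bool.and_eq_true, decide_eq_true_eq, beq_iff_eq] at ht
      obtain ⟨hC, hKval⟩ := ht
      rw [if_pos hC]
      have hKval' : cellv K ((i : Int) - mr).toNat ((j : Int) - mc).toNat = 1 - cellv L i j := hKval
      omega
  · intro hOK
    constructor
    · intro t ht
      obtain ⟨i, hi, j, hj, hv, rfl⟩ := (mem_defectsOf L t).mp ht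
      have hin : i < n := by omega
      have hjn : j < n := by
        have := hLrow i hin
        omega
      have hOKij := hOK i hin j hjn
      simp only [Bool.and_eq_true, decide_eq_true_eq, beq_iff_eq]
      split_ifs at hOKij with hC
      · refine ⟨hC, ?_⟩
        have hbridge : (K.getD ((i : Int) - mr).toNat []).getD ((j : Int) - mc).toNat 0
            = cellv K ((i : Int) - mr).toNat ((j : Int) - mc).toNat := rfl
        omega
      · exact absurd (by omega : cellv L i j = 1) hv
    · intro t ht
      obtain ⟨a, ha, b, hb, hw, rfl⟩ := (mem_onesOf K t).mp ht
      have ham : a < m := by omega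
      have hbm : b < m := by
        have := hKrow a ham
        omega
      simp only [Bool.not_eq_eq_eq_not, Bool.not_true, Bool.and_eq_false_iff,
        decide_eq_false_iff_not, beq_eq_false_iff_ne, ne_eq]
      by_cases hC : 0 ≤ (a : Int) + mr ∧ (a : Int) + mr < (n : Int) ∧ 0 ≤ (b : Int) + mc ∧ (b : Int) + mc < (n : Int)
      · right
        intro hLval
        set i : Nat := ((a : Int) + mr).toNat with hidef
        set j : Nat := ((b : Int) + mc).toNat with hjdef
        have hOKij := hOK i (by omega) j (by omega)
        have hiC : 0 ≤ (i : Int) - mr ∧ (i : Int) - mr < (m : Int) ∧ 0 ≤ (j : Int) - mc ∧ (j : Int) - mc < (m : Int) := ⟨by omega, by omega, by omega, by omega⟩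
        rw [if_pos hiC] at hOKij
        have hia : ((i : Int) - mr).toNat = a := by omega
        have hjb : ((j : Int) - mc).toNat = b := by omega
        rw [hia, hjb] at hOKij
        have hcl : cellv L i j = 1 := hLval
        rw [hcl] at hOKij
        exact hw (by omega)
      · left
        exact hC






theorem rotStepA_len (g : List (List Int)) : (rotStepA g).length = g.length :=
  (rotStepA_sq g).1

theorem bool_ext (x y : Bool) (h : x = true ↔ y = true) : x = y := by
  cases x <;> cases y <;> simp_all



-- ===== VERDICT (by name: the statement is the Claim_ definition above) =====
theorem solution_spec : Claim_equal_solution := by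
  intro key lock _dom pre
  obtain ⟨preK, preL⟩ := pre
  unfold Spec_solution
  simp only [solution, solution_alt]
  set n := lock.length with hn
  set m := key.length with hm
  set L := lock.map (fun row => PySem.List.slice row none (some (n : Int))) with hLdef
  set K := key.map (fun row => PySem.List.slice row none (some (m : Int))) with hKdef
  have hKmap : K = key.map (fun row => row.take m) := by
    rw [hKdef]
    exact List.map_congr_left fun row _ => PySem.List.slice_to_natCast row m
  have hLmap : L = lock.map (fun row => row.take n) := by
    rw [hLdef]
    exact List.map_congr_left fun row _ => PySem.List.slice_to_natCast row n
  have hKsq : Sq K m := by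
    rw [hKmap]
    refine ⟨by simp [hm], ?_⟩
    intro row hrow
    simp only [List.mem_map] at hrow
    obtain ⟨r, hr, rfl⟩ := hrow
    have := preK r hr
    simp only [List.length_take]
    omega
  have hLsq : Sq L n := by
    rw [hLmap]
    refine ⟨by simp [hn], ?_⟩
    intro row hrow
    simp only [List.mem_map] at hrow
    obtain ⟨r, hr, rfl⟩ := hrow
    have := preL r hr
    simp only [List.length_take]
    omega
  have hcellK : ∀ a < m, ∀ b < m, cellv K a b = cellv key a b := by
    intro a ha b hb
    rw [hKmap]
    unfold cellv
    have ha' : a < key.length := ha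
    have hrowlen : m ≤ key[a].length := preK key[a] (List.getElem_mem _)
    have e1 : (key.map (fun row => row.take m)).getD a [] = key[a].take m := by
      rw [List.getD_eq_getElem _ _ (by simpa using ha')]
      simp
    have e2 : key.getD a [] = key[a] := List.getD_eq_getElem _ _ ha'
    rw [e1, e2]
    have hblt : b < (key[a].take m).length := by
      simp only [List.length_take]
      omega
    rw [List.getD_eq_getElem _ _ hblt, List.getElem_take,
      List.getD_eq_getElem _ _ (by omega : b < key[a].length)]
  have hcellL : ∀ i < n, ∀ j < n, cellv lock i j = cellv L i j := by
    intro i hi j hj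
    rw [hLmap]
    unfold cellv
    have hi' : i < lock.length := hi
    have hrowlen : n ≤ lock[i].length := preL lock[i] (List.getElem_mem _)
    have e1 : (lock.map (fun row => row.take n)).getD i [] = lock[i].take n := by
      rw [List.getD_eq_getElem _ _ (by simpa using hi')]
      simp
    have e2 : lock.getD i [] = lock[i] := List.getD_eq_getElem _ _ hi'
    rw [e1, e2]
    have hjlt : j < (lock[i].take n).length := by
      simp only [List.length_take]
      omega
    rw [List.getD_eq_getElem _ _ hjlt, List.getElem_take,
      List.getD_eq_getElem _ _ (by omega : j < lock[i].length)]
  have hiter : ∀ r : Nat, rotStepB^[r] K = rotStepA^[r] K ∧ Sq (rotStepB^[r] K) m := by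
    intro r
    induction r with
    | zero => exact ⟨rfl, hKsq⟩
    | succ p ih =>
      rw [Function.iterate_succ_apply', Function.iterate_succ_apply']
      have hstep : rotStepB (rotStepB^[p] K) = rotStepA (rotStepB^[p] K) :=
        rotStepB_eq_rotStepA _ m ih.2
      constructor
      · rw [hstep, ih.1]
      · rw [hstep]
        have := rotStepA_sq (rotStepB^[p] K)
        rwa [ih.2.1] at this
  have hAlen : ∀ r : Nat, (rotStepA^[r] key).length = m := by
    intro r
    induction r with
    | zero => exact hm.symm
    | succ p ih =>
      rw [Function.iterate_succ_apply', rotStepA_len]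
      exact ih
  have hAcells : ∀ r : Nat, ∀ a < m, ∀ b < m,
      cellv (rotStepA^[r] key) a b = cellv (rotStepB^[r] K) a b := by
    intro r
    cases r with
    | zero =>
      intro a ha b hb
      simp only [Function.iterate_zero_apply]
      exact (hcellK a ha b hb).symm
    | succ p =>
      have heq : rotStepA^[p + 1] key = rotStepB^[p + 1] K := by
        rw [(hiter (p + 1)).1, Function.iterate_succ_apply, Function.iterate_succ_apply]
        congr 1
        refine rotStepA_congr key K (by rw [hKsq.1, ← hm]) ?_
        intro i hi j hj
        exact (hcellK i (by omega) j (by omega)).symm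
      intro a _ b _
      rw [heq]
  rw [solLoop_eq]
  refine PySem.List.any_congr_mem ?_
  intro r hr
  simp only [List.mem_range] at hr
  have hk : rotate key (r : Int) 0 = rotStepA^[r] key :=
    rotate_eq_iter r key r 0 (by positivity) (by simp)
  rw [hk, show -(n : Int) + 1 = 1 - (n : Int) by ring]
  refine PySem.List.any_congr_mem ?_
  intro mr _
  refine PySem.List.any_congr_mem ?_
  intro mc _
  refine bool_ext _ _ ?_
  rw [moveCheck_iff, fits_iff n m (rotStepB^[r] K) L hLsq.1 hLsq.2 (hiter r).2.1 (hiter r).2.2]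
  · rw [hAlen r]
    exact OKP_congr n m _ (rotStepB^[r] K) lock L mr mc hcellL (hAcells r)
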